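-- pv_equiv track=rewrite | github.com/queelius/computational-explorations | src/set_theory_attacks.py | find_sunflower
-- ===== SOURCE A (Python) =====
-- from itertools import combinations, product as iproduct
-- from typing import Dict, FrozenSet, List, Optional, Set, Tuple
--
-- def find_sunflower(family: List[FrozenSet[int]], r: int) -> Optional[Tuple[List[int], FrozenSet[int]]]:
--     """
--     Find a sunflower with r petals in the family.
--
--     Returns (indices, kernel) if found, None otherwise.
--     """
--     if len(family) < r:
--         return None
--
--     for indices in combinations(range(len(family)), r):
--         sets = [family[i] for i in indices]
--         kernel = sets[0]
--         for s in sets[1:]: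
--             kernel = kernel & s
--
--         is_sf = True
--         for i in range(len(sets)):
--             for j in range(i + 1, len(sets)):
--                 if sets[i] & sets[j] != kernel:
--                     is_sf = False
--                     break
--             if not is_sf:
--                 break
--
--         if is_sf:
--             return list(indices), kernel
--
--     return None
-- ===== SOURCE B (Python) =====
-- from itertools import combinations
--
--
-- def find_sunflower(family, r):
--     """
--     Find a sunflower with r petals in the family.
--
--     Returns (indices, kernel) if found, None otherwise.
--
--     Instead of comparing every pair of sets against the kernel (O(r^2)
--     intersections), sweep the sets once: the combination is a sunflower
--     iff the petals (set minus kernel) are pairwise disjoint, which a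
--     single running 'seen' set detects.
--     """
--     if len(family) < r:
--         return None
--
--     for indices in combinations(range(len(family)), r):
--         sets = [family[i] for i in indices]
--         kernel = sets[0]
--         for s in sets[1:]:
--             kernel = kernel & s
--
--         seen = frozenset()
--         is_sf = True
--         for s in sets:
--             petal = s - kernel
--             if petal & seen:
--                 is_sf = False
--                 break
--             seen = seen | petal
--
--         if is_sf:
--             return list(indices), kernel
--
--     return None
-- ===== Notes on version B (the rewrite author's own statement) =====
-- stated objective: alternative
-- what changed: The O(r^2) pairwise 'sets[i] & sets[j] == kernel' check per combination is replaced by a single sweep that accumulates a running 'seen' set and rejects as soon as a petal (set minus kernel) overlaps it; outer combination loop and kernel computation unchanged.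
import Mathlib
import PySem

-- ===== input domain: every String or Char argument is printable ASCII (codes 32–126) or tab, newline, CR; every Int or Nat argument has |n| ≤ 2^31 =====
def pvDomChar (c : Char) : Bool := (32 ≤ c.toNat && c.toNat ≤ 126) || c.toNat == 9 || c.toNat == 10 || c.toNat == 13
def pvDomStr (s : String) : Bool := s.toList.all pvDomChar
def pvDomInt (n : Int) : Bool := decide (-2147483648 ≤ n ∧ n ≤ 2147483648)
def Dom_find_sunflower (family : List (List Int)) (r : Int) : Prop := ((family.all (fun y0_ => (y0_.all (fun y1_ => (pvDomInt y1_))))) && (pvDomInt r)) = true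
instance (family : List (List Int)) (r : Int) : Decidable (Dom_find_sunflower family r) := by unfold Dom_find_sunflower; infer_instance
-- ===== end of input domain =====

-- B replaces A's O(r^2) pairwise-intersection check per combination by one sweep over the sets
-- with a running 'seen' set of petal elements (petal disjointness); the outer combination loop
-- and the kernel computation are unchanged.

-- ===== PORT A =====
-- shared by both ports (the same lines appear verbatim in both Pythons):
-- sets = [family[i] for i in indices]   (family elements are frozensets: Set.ofList models the dedup)
def pvSetsOf (family : List (List Int)) (indices : List Int) : List (List Int) :=
  indices.map (fun i => PySem.Set.ofList (PySem.List.pyGetD family i []))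

-- kernel = sets[0]; for s in sets[1:]: kernel = kernel & s
-- (Pre_ gives 1 ≤ r, so sets ≠ [] and headD's default is never used; at r = 0 Python raises IndexError here)
def pvKernelOf (sets : List (List Int)) : List Int :=
  (sets.drop 1).foldl PySem.Set.inter (sets.headD [])

-- A's nested index loops with the break-out flag: is_sf stays True iff every pair passes
def pvCheckA (sets : List (List Int)) (kernel : List Int) : Bool :=
  (PySem.List.pyRange 0 (sets.length : Int) 1).all fun i =>
    (PySem.List.pyRange (i + 1) (sets.length : Int) 1).all fun j =>
      PySem.Set.equal
        (PySem.Set.inter (PySem.List.pyGetD sets i []) (PySem.List.pyGetD sets j [])) kernel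

def pvLoopA (family : List (List Int)) : List (List Int) → Option (List Int × List Int)
  | [] => none
  | indices :: rest =>
    let sets := pvSetsOf family indices
    let kernel := pvKernelOf sets
    if pvCheckA sets kernel then some (indices, kernel) else pvLoopA family rest

def find_sunflower (family : List (List Int)) (r : Int) : Option (List Int × List Int) :=
  if (family.length : Int) < r then none
  else pvLoopA family (PySem.List.combinations (PySem.List.pyRange 0 (family.length : Int) 1) r.toNat)

-- ===== PORT B =====
-- the single sweep: petal = s - kernel; if petal & seen: fail; seen |= petal
def pvLoopSeen (kernel : List Int) (seen : List Int) : List (List Int) → Bool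
  | [] => true
  | s :: rest =>
    let petal := PySem.Set.diff s kernel
    if PySem.Set.inter petal seen = [] then pvLoopSeen kernel (PySem.Set.union seen petal) rest
    else false

def pvCheckB (sets : List (List Int)) (kernel : List Int) : Bool :=
  pvLoopSeen kernel PySem.Set.empty sets

def pvLoopB (family : List (List Int)) : List (List Int) → Option (List Int × List Int)
  | [] => none
  | indices :: rest =>
    let sets := pvSetsOf family indices
    let kernel := pvKernelOf sets
    if pvCheckB sets kernel then some (indices, kernel) else pvLoopB family rest

def find_sunflower_alt (family : List (List Int)) (r : Int) : Option (List Int × List Int) :=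
  if (family.length : Int) < r then none
  else pvLoopB family (PySem.List.combinations (PySem.List.pyRange 0 (family.length : Int) 1) r.toNat)

-- ===== PRECONDITION & SPEC =====
-- Pre_ excludes exactly r ≤ 0, where Python A raises (ValueError from combinations for r < 0,
-- IndexError at sets[0] for r = 0); A never raises for r ≥ 1.
def Pre_find_sunflower (family : List (List Int)) (r : Int) : Prop := 1 ≤ r
instance (family : List (List Int)) (r : Int) : Decidable (Pre_find_sunflower family r) := by unfold Pre_find_sunflower; infer_instance
def pvWitness_find_sunflower : List (List Int) × Int := ([[1, 2], [1, 3]], 2)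

def Spec_find_sunflower (family : List (List Int)) (r : Int) (out : Option (List Int × List Int)) : Prop := out = find_sunflower_alt family r
instance (family : List (List Int)) (r : Int) (out : Option (List Int × List Int)) : Decidable (Spec_find_sunflower family r out) := by unfold Spec_find_sunflower; infer_instance

-- ===== CLAIM (what is proved, stated in full; the proofs are below) =====
def Claim_equal_find_sunflower : Prop := ∀ (family : List (List Int)) (r : Int), Dom_find_sunflower family r → Pre_find_sunflower family r → Spec_find_sunflower family r (find_sunflower family r)

-- ===== LEMMAS AND PROOFS =====

-- membership in the folded intersection
theorem pv_mem_foldl_inter (l : List (List Int)) (init : List Int) (x : Int) :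
    x ∈ l.foldl PySem.Set.inter init ↔ x ∈ init ∧ ∀ s ∈ l, x ∈ s := by
  induction l generalizing init with
  | nil => simp
  | cons s rest ih =>
    simp only [List.foldl_cons, ih, PySem.Set.mem_inter, List.mem_cons]
    constructor
    · rintro ⟨⟨hx, hs⟩, h⟩
      exact ⟨hx, fun t ht => ht.elim (fun e => e ▸ hs) (h t)⟩
    · rintro ⟨hx, h⟩
      exact ⟨⟨hx, h s (Or.inl rfl)⟩, fun t ht => h t (Or.inr ht)⟩

theorem pv_mem_kernel (s0 : List Int) (rest : List (List Int)) (x : Int) :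
    x ∈ pvKernelOf (s0 :: rest) ↔ ∀ s ∈ s0 :: rest, x ∈ s := by
  simp only [pvKernelOf, List.drop_succ_cons, List.drop_zero, List.headD_cons,
    pv_mem_foldl_inter, List.mem_cons]
  constructor
  · rintro ⟨h0, h⟩ t ht
    exact ht.elim (fun e => e ▸ h0) (h t)
  · intro h
    exact ⟨h s0 (Or.inl rfl), fun t ht => h t (Or.inr ht)⟩

-- characterisation of B's sweep
theorem pv_loopSeen_iff (K : List Int) (l : List (List Int)) (seen : List Int) :
    pvLoopSeen K seen l = true ↔
      (∀ s ∈ l, ∀ x ∈ s, x ∉ K → x ∉ seen) ∧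
        l.Pairwise (fun s t => ∀ x, x ∈ s → x ∈ t → x ∈ K) := by
  induction l generalizing seen with
  | nil => simp [pvLoopSeen]
  | cons s rest ih =>
    simp only [pvLoopSeen, List.pairwise_cons]
    by_cases h : PySem.Set.inter (PySem.Set.diff s K) seen = []
    · rw [if_pos h, ih]
      have hdisj : ∀ x ∈ s, x ∉ K → x ∉ seen := by
        intro x hxs hxK hxseen
        have : x ∈ PySem.Set.inter (PySem.Set.diff s K) seen :=
          (PySem.Set.mem_inter _ _ _).mpr ⟨(PySem.Set.mem_diff _ _ _).mpr ⟨hxs, hxK⟩, hxseen⟩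
        rw [h] at this
        exact List.not_mem_nil this
      constructor
      · rintro ⟨h1, h2⟩
        refine ⟨?_, ⟨?_, h2⟩⟩
        · intro t ht x hx hK
          rcases List.mem_cons.mp ht with rfl | ht'
          · exact hdisj x hx hK
          · intro hxseen
            exact h1 t ht' x hx hK ((PySem.Set.mem_union _ _ _).mpr (Or.inl hxseen))
        · intro t ht x hxs hxt
          by_contra hK
          exact h1 t ht x hxt hK
            ((PySem.Set.mem_union _ _ _).mpr (Or.inr ((PySem.Set.mem_diff _ _ _).mpr ⟨hxs, hK⟩)))
      · rintro ⟨h1, h2, h3⟩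
        refine ⟨?_, h3⟩
        intro t ht x hx hK hxu
        rcases (PySem.Set.mem_union _ _ _).mp hxu with hxseen | hxpetal
        · exact h1 t (List.mem_cons_of_mem _ ht) x hx hK hxseen
        · rcases (PySem.Set.mem_diff _ _ _).mp hxpetal with ⟨hxs, _⟩
          exact hK (h2 t ht x hxs hx)
    · rw [if_neg h]
      constructor
      · intro hf
        cases hf
      · rintro ⟨h1, -⟩
        exfalso
        apply h
        rw [List.eq_nil_iff_forall_not_mem]
        intro x hx
        rcases (PySem.Set.mem_inter _ _ _).mp hx with ⟨hxp, hxseen⟩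
        rcases (PySem.Set.mem_diff _ _ _).mp hxp with ⟨hxs, hxK⟩
        exact h1 s (List.mem_cons_self) x hxs hxK hxseen

-- characterisation of A's nested index loops
theorem pv_checkA_iff (sets : List (List Int)) (K : List Int) :
    pvCheckA sets K = true ↔
      ∀ i j : Nat, ∀ hi : i < sets.length, ∀ hj : j < sets.length, i < j →
        (∀ x : Int, x ∈ sets[i] ∧ x ∈ sets[j] ↔ x ∈ K) := by
  simp only [pvCheckA, List.all_eq_true, PySem.List.mem_pyRange_one]
  constructor
  · intro h i j hi hj hij x
    have hm := h (i : Int) ⟨by omega, by exact_mod_cast hi⟩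
      (j : Int) ⟨by omega, by exact_mod_cast hj⟩
    rw [PySem.Set.equal_iff] at hm
    have hmx := hm x
    rwa [PySem.Set.mem_inter, PySem.List.pyGetD_natCast, PySem.List.pyGetD_natCast,
      List.getD_eq_getElem _ _ hi, List.getD_eq_getElem _ _ hj] at hmx
  · intro h i hi j hj
    obtain ⟨hi0, hiL⟩ := hi
    obtain ⟨hj0, hjL⟩ := hj
    rw [PySem.Set.equal_iff]
    intro x
    have hi' : i.toNat < sets.length := by omega
    have hj' : j.toNat < sets.length := by omega
    have hii : ((i.toNat : Nat) : Int) = i := by omega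
    have hjj : ((j.toNat : Nat) : Int) = j := by omega
    rw [PySem.Set.mem_inter, ← hii, ← hjj, PySem.List.pyGetD_natCast, PySem.List.pyGetD_natCast,
      List.getD_eq_getElem _ _ hi', List.getD_eq_getElem _ _ hj']
    exact h i.toNat j.toNat hi' hj' (by omega) x

-- the two checks agree on every nonempty sets list with its own kernel
theorem pv_check_eq (sets : List (List Int)) (hne : sets ≠ []) :
    pvCheckA sets (pvKernelOf sets) = pvCheckB sets (pvKernelOf sets) := by
  obtain ⟨s0, rest, rfl⟩ := List.exists_cons_of_ne_nil hne
  have hK := pv_mem_kernel s0 rest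
  rw [Bool.eq_iff_iff, pv_checkA_iff, pvCheckB, pv_loopSeen_iff, List.pairwise_iff_getElem]
  constructor
  · intro h
    refine ⟨by simp [PySem.Set.empty], ?_⟩
    intro i j hi hj hij x hxi hxj
    exact (h i j hi hj hij x).mp ⟨hxi, hxj⟩
  · rintro ⟨-, h⟩ i j hi hj hij x
    constructor
    · rintro ⟨a, b⟩
      exact h i j hi hj hij x a b
    · intro hxK
      exact ⟨(hK x).mp hxK _ (List.getElem_mem hi), (hK x).mp hxK _ (List.getElem_mem hj)⟩

-- the two searches agree on a list of nonempty combinations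
theorem pv_loop_eq (family : List (List Int)) (combos : List (List Int))
    (h : ∀ c ∈ combos, c ≠ []) : pvLoopA family combos = pvLoopB family combos := by
  induction combos with
  | nil => rfl
  | cons c rest ih =>
    have hc : pvSetsOf family c ≠ [] := by
      simp [pvSetsOf, h c List.mem_cons_self]
    simp only [pvLoopA, pvLoopB, pvCheckB, pv_check_eq _ hc]
    split <;> [rfl; exact ih (fun d hd => h d (List.mem_cons_of_mem _ hd))]

-- ===== VERDICT (by name: the statement is the Claim_ definition above) =====
theorem find_sunflower_spec : Claim_equal_find_sunflower := by
  intro family r _ hpre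
  unfold Pre_find_sunflower at hpre
  unfold Spec_find_sunflower find_sunflower find_sunflower_alt
  split
  · rfl
  · apply pv_loop_eq
    intro c hc
    have := PySem.List.length_of_mem_combinations hc
    intro hnil
    rw [hnil] at this
    simp at this
    omega
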